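-- pv_equiv track=rewrite | github.com/Comunitea/CMNT_00126_2018_ORB_addons | orb_custom_documents/models/stock_production_lot.py | encode128
-- ===== SOURCE A (Python) =====
-- def encode128(s):
--     ''' Code 128 conversion for a font as described at
--         https://en.wikipedia.org/wiki/Code_128 and downloaded
--         from http://www.barcodelink.net/barcode-font.php
--         Only encodes ASCII characters, does not take advantage of
--         FNC4 for bytes with the upper bit set.
--         It does not attempt to optimize the length of the string,
--         Code B is the default to prefer lower case over control characters.
--         Coded for https://stackoverflow.com/q/52710760/5987
--     '''
--     s = s.encode('ascii').decode('ascii')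
--     if s.isdigit() and len(s) % 2 == 0:
--         # use Code 128C, pairs of digits
--         codes = [105]
--         for i in range(0, len(s), 2):
--             codes.append(int(s[i:i+2], 10))
--     else:
--         # use Code 128B and shift for Code 128A
--         mapping = dict((chr(c), [98, c + 64] if c < 32 else [c - 32]) for c in range(128))
--         codes = [104]
--         for c in s:
--             codes.extend(mapping[c])
--     check_digit = (codes[0] + sum(i * x for i,x in enumerate(codes))) % 103
--     return check_digit
-- ===== SOURCE B (Python) =====
-- def encode128(s):
--     ''' Same check digit as the original, computed in one streaming pass:
--         no codes list is built; an accumulator carries the running weighted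
--         sum (start code has total weight 1) and a position counter. '''
--     s = s.encode('ascii').decode('ascii')
--     if s.isdigit() and len(s) % 2 == 0:
--         acc, pos, i = 105, 0, 0
--         while i < len(s):
--             pos += 1
--             acc += pos * ((ord(s[i]) - 48) * 10 + (ord(s[i + 1]) - 48))
--             i += 2
--         return acc % 103
--     acc, pos = 104, 0
--     for ch in s:
--         o = ord(ch)
--         if o < 32:
--             acc += (pos + 1) * 98 + (pos + 2) * (o + 64)
--             pos += 2
--         else:
--             acc += (pos + 1) * (o - 32)
--             pos += 1
--     return acc % 103
-- ===== Notes on version B (the rewrite author's own statement) =====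
-- stated objective: alternative
-- what changed: B computes the Code128 check digit in one streaming pass with a running accumulator and position counter (indexing digit pairs directly, ord-arithmetic instead of slicing+int()), never materializing the codes list that A builds and then sums over enumerate.
import Mathlib
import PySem

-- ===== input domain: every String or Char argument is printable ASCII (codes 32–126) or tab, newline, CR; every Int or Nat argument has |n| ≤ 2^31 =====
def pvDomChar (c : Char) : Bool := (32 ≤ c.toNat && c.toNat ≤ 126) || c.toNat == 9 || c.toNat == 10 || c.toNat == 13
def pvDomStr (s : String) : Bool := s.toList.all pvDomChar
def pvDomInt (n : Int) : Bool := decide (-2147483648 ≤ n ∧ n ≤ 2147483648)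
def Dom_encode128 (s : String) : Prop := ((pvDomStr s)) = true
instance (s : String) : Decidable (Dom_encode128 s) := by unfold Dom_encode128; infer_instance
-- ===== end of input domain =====

-- B computes the check digit in one streaming pass (accumulator + position counter)
-- instead of materializing the codes list and then summing over enumerate(codes).

-- ===== PORT A =====
-- Hand port of A's dict comprehension `mapping`: this is exactly the value mapping[c]
-- for every ASCII char c (0 ≤ ord(c) < 128); Dom admits only chars ≤ 126, so A's
-- dict lookup never raises on the claimed domain.
def pvMapping128 (c : Char) : List Int :=
  if c.toNat < 32 then [98, (c.toNat : Int) + 64] else [(c.toNat : Int) - 32]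

def encode128 (s : String) : Int :=
  let cs := s.toList
  let codes : List Int :=
    if PySem.Chars.strIsdigit cs && cs.length % 2 == 0 then
      -- int(s[i:i+2], 10) never raises here (the guard guarantees digit pairs), so .getD 0 is exact
      (PySem.List.pyRange 0 (cs.length : Int) 2).foldl
        (fun codes i =>
          codes ++ [(PySem.Int.ofCharsBase? (PySem.List.slice cs (some i) (some (i + 2))) 10).getD 0])
        [105]
    else
      cs.foldl (fun codes c => codes ++ pvMapping128 c) [104]
  PySem.Int.mod (PySem.List.pyGetD codes 0 0 +
    ((PySem.List.enumerate codes 0).map (fun p => p.1 * p.2)).sum) 103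

-- ===== PORT B =====
-- Source B's while loop over index pairs (the guard guarantees an even number of digits,
-- so the two-chars-at-a-time pattern is exactly s[i], s[i+1], i += 2)
def pvAltPairs : List Char → Int → Int → Int
  | c0 :: c1 :: rest, pos, acc =>
      pvAltPairs rest (pos + 1)
        (acc + (pos + 1) * (((c0.toNat : Int) - 48) * 10 + ((c1.toNat : Int) - 48)))
  | _, _, acc => acc

-- Source B's for loop over characters
def pvAltChars : List Char → Int → Int → Int
  | [], _, acc => acc
  | c :: rest, pos, acc =>
      if c.toNat < 32 then
        pvAltChars rest (pos + 2) (acc + (pos + 1) * 98 + (pos + 2) * ((c.toNat : Int) + 64))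
      else
        pvAltChars rest (pos + 1) (acc + (pos + 1) * ((c.toNat : Int) - 32))

def encode128_alt (s : String) : Int :=
  let cs := s.toList
  if PySem.Chars.strIsdigit cs && cs.length % 2 == 0 then
    PySem.Int.mod (pvAltPairs cs 0 105) 103
  else
    PySem.Int.mod (pvAltChars cs 0 104) 103

-- ===== PRECONDITION & SPEC =====
def Spec_encode128 (s : String) (out : Int) : Prop := out = encode128_alt s
instance (s : String) (out : Int) : Decidable (Spec_encode128 s out) := by unfold Spec_encode128; infer_instance

-- ===== CLAIM (what is proved, stated in full; the proofs are below) =====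
def Claim_equal_encode128 : Prop := ∀ (s : String), Dom_encode128 s → Spec_encode128 s (encode128 s)

-- ===== LEMMAS AND PROOFS =====

-- the weighted sum A computes over enumerate(codes), as a function of the start weight
def pvWsum (l : List Int) (k : Int) : Int :=
  ((PySem.List.enumerate l k).map (fun p => p.1 * p.2)).sum

theorem pvWsum_nil (k : Int) : pvWsum [] k = 0 := by
  simp [pvWsum, PySem.List.enumerate_nil]

theorem pvWsum_cons (x : Int) (l : List Int) (k : Int) :
    pvWsum (x :: l) k = k * x + pvWsum l (k + 1) := by
  simp [pvWsum, PySem.List.enumerate_cons]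

-- every digit char is one of '0'..'9'
theorem pvDigitCases (c : Char) (h : PySem.Chars.isdigit c = true) :
    c = '0' ∨ c = '1' ∨ c = '2' ∨ c = '3' ∨ c = '4' ∨ c = '5' ∨ c = '6' ∨ c = '7' ∨ c = '8' ∨ c = '9' := by
  simp only [PySem.Chars.isdigit, Bool.and_eq_true, decide_eq_true_eq, Char.le_def,
    UInt32.le_iff_toNat_le] at h
  obtain ⟨h1, h2⟩ := h
  have h1' : 48 ≤ c.val.toNat := h1
  have h2' : c.val.toNat ≤ 57 := h2
  have hc := (Char.ofNat_toNat c).symm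
  unfold Char.toNat at hc
  interval_cases hn : c.val.toNat <;> simp_all

-- int(two digit chars, 10)
theorem pvParseTwo (c0 c1 : Char) (h0 : PySem.Chars.isdigit c0 = true) (h1 : PySem.Chars.isdigit c1 = true) :
    PySem.Int.ofCharsBase? [c0, c1] 10 = some (((c0.toNat : Int) - 48) * 10 + ((c1.toNat : Int) - 48)) := by
  rcases pvDigitCases c0 h0 with h|h|h|h|h|h|h|h|h|h <;> subst h <;>
    rcases pvDigitCases c1 h1 with h|h|h|h|h|h|h|h|h|h <;> subst h <;> decide

-- the symbol A appends for the pair starting at index i, as a function of the string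
def pvPairSym (cs : List Char) (i : Int) : Int :=
  (PySem.Int.ofCharsBase? (PySem.List.slice cs (some i) (some (i + 2))) 10).getD 0

theorem pvSliceHead (c0 c1 : Char) (rest : List Char) :
    PySem.List.slice (c0 :: c1 :: rest) (some 0) (some (0 + 2)) = [c0, c1] := by
  rw [PySem.List.slice_toNat _ (by norm_num) (by norm_num)]
  rfl

theorem pvSliceShift (c0 c1 : Char) (rest : List Char) (k : Nat) :
    PySem.List.slice (c0 :: c1 :: rest) (some (2 * ((k : Int) + 1))) (some (2 * ((k : Int) + 1) + 2)) =
      PySem.List.slice rest (some (2 * (k : Int))) (some (2 * (k : Int) + 2)) := by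
  rw [PySem.List.slice_toNat _ (by positivity) (by positivity),
      PySem.List.slice_toNat _ (by positivity) (by positivity)]
  have e1 : (2 * ((k : Int) + 1)).toNat = 2 * k + 2 := by omega
  have e2 : (2 * ((k : Int) + 1) + 2).toNat = 2 * k + 4 := by omega
  have e3 : (2 * (k : Int)).toNat = 2 * k := by omega
  have e4 : (2 * (k : Int) + 2).toNat = 2 * k + 2 := by omega
  rw [e1, e2, e3, e4]
  have : List.drop (2 * k + 2) (c0 :: c1 :: rest) = List.drop (2 * k) rest := by
    rw [show 2 * k + 2 = (2 * k + 1) + 1 by ring, List.drop_succ_cons, List.drop_succ_cons]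
  rw [this]
  congr 1
  omega

-- A's list of pair symbols, as a map over List.range of half the length
theorem pvPairList (cs : List Char) (m : Nat) (hlen : cs.length = 2 * m) :
    (PySem.List.pyRange 0 (cs.length : Int) 2).map (pvPairSym cs) =
      (List.range m).map (fun k : Nat => pvPairSym cs (2 * (k : Int))) := by
  rw [PySem.List.pyRange_of_pos 0 (cs.length : Int) (by norm_num), hlen]
  have hr : (if (0 : Int) < (2 * m : Nat) then (((2 * m : Nat) : Int) - 0 + 2 - 1) / 2 |>.toNat else 0) = m := by
    split <;> omega
  rw [hr, List.map_map]
  exact List.map_congr_left fun k _ => by norm_num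

-- streaming C-branch pass = weighted sum of A's pair-symbol list
theorem pvAltPairs_eq : ∀ (n : Nat) (cs : List Char), cs.length = 2 * n →
    (∀ c ∈ cs, PySem.Chars.isdigit c = true) →
    ∀ pos acc : Int, pvAltPairs cs pos acc =
      acc + pvWsum ((PySem.List.pyRange 0 (cs.length : Int) 2).map (pvPairSym cs)) (pos + 1) := by
  intro n
  induction n with
  | zero =>
    intro cs hlen _ pos acc
    match cs, hlen with
    | [], _ =>
      simp [pvAltPairs, PySem.List.pyRange, pvWsum_nil]
  | succ m ih =>
    intro cs hlen hdig pos acc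
    match cs, hlen with
    | c0 :: c1 :: rest, hlen =>
      have hrest : rest.length = 2 * m := by
        have h := hlen; simp only [List.length_cons] at h; omega
      have hd0 : PySem.Chars.isdigit c0 = true := hdig c0 (by simp)
      have hd1 : PySem.Chars.isdigit c1 = true := hdig c1 (by simp)
      -- decompose A's symbol list: head pair, then the shifted tail
      have hlist : (PySem.List.pyRange 0 ((c0 :: c1 :: rest).length : Int) 2).map (pvPairSym (c0 :: c1 :: rest)) =
          pvPairSym (c0 :: c1 :: rest) 0 ::
            (PySem.List.pyRange 0 (rest.length : Int) 2).map (pvPairSym rest) := by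
        rw [pvPairList _ (m + 1) hlen, pvPairList rest m hrest,
            List.range_succ_eq_map, List.map_cons, List.map_map]
        refine congrArg₂ List.cons (by norm_num) ?_
        refine List.map_congr_left fun k _ => ?_
        show pvPairSym (c0 :: c1 :: rest) (2 * ((k + 1 : Nat) : Int)) = pvPairSym rest (2 * (k : Int))
        rw [show ((k + 1 : Nat) : Int) = (k : Int) + 1 by push_cast; ring_nf]
        unfold pvPairSym
        rw [pvSliceShift]
      have hhead : pvPairSym (c0 :: c1 :: rest) 0 =
          ((c0.toNat : Int) - 48) * 10 + ((c1.toNat : Int) - 48) := by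
        unfold pvPairSym
        rw [show (0 : Int) + 2 = 0 + 2 by rfl, pvSliceHead, pvParseTwo c0 c1 hd0 hd1]
        rfl
      rw [hlist, pvWsum_cons, hhead]
      show pvAltPairs rest (pos + 1)
          (acc + (pos + 1) * (((c0.toNat : Int) - 48) * 10 + ((c1.toNat : Int) - 48))) = _
      rw [ih rest hrest (fun c hc => hdig c (by simp [hc])) (pos + 1)]
      ring

-- streaming B-branch pass = weighted sum of A's flatMapped mapping list
theorem pvAltChars_eq : ∀ (cs : List Char) (pos acc : Int),
    pvAltChars cs pos acc = acc + pvWsum (cs.flatMap pvMapping128) (pos + 1) := by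
  intro cs
  induction cs with
  | nil => intro pos acc; simp [pvAltChars, pvWsum_nil]
  | cons c rest ih =>
    intro pos acc
    by_cases hc : c.toNat < 32
    · show pvAltChars (c :: rest) pos acc = _
      rw [show pvAltChars (c :: rest) pos acc =
            pvAltChars rest (pos + 2)
              (acc + (pos + 1) * 98 + (pos + 2) * ((c.toNat : Int) + 64)) by
            simp [pvAltChars, hc]]
      rw [ih]
      simp only [List.flatMap_cons, pvMapping128, if_pos hc, List.cons_append, List.nil_append,
        pvWsum_cons]
      ring_nf
    · rw [show pvAltChars (c :: rest) pos acc =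
            pvAltChars rest (pos + 1) (acc + (pos + 1) * ((c.toNat : Int) - 32)) by
            simp [pvAltChars, hc]]
      rw [ih]
      simp only [List.flatMap_cons, pvMapping128, if_neg hc, List.cons_append, List.nil_append,
        pvWsum_cons]
      ring_nf

-- A's check-digit expression over codes = c :: tail equals start + weighted tail sum
theorem pvCheckExpr (c : Int) (tail : List Int) :
    PySem.List.pyGetD (c :: tail) 0 0 +
      ((PySem.List.enumerate (c :: tail) 0).map (fun p => p.1 * p.2)).sum =
    c + pvWsum tail 1 := by
  rw [PySem.List.pyGetD_zero_cons, PySem.List.enumerate_cons]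
  show c + (0 * c + pvWsum tail (0 + 1)) = c + pvWsum tail 1
  norm_num

-- ===== VERDICT (by name: the statement is the Claim_ definition above) =====
theorem encode128_spec : Claim_equal_encode128 := by
  unfold Claim_equal_encode128 Spec_encode128
  intro s _
  unfold encode128 encode128_alt
  by_cases hcond : (PySem.Chars.strIsdigit s.toList && s.toList.length % 2 == 0) = true
  · simp only [hcond, if_pos]
    have hdig : ∀ c ∈ s.toList, PySem.Chars.isdigit c = true := by
      have := (Bool.and_eq_true _ _).mp hcond |>.1
      simp only [PySem.Chars.strIsdigit, Bool.and_eq_true, List.all_eq_true] at this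
      exact fun c hc => this.2 c hc
    have heven : s.toList.length % 2 = 0 := by
      have := (Bool.and_eq_true _ _).mp hcond |>.2
      simpa using this
    have hm : s.toList.length = 2 * (s.toList.length / 2) := by omega
    rw [PySem.List.foldl_append_singleton_eq_map (fun i =>
      (PySem.Int.ofCharsBase? (PySem.List.slice s.toList (some i) (some (i + 2))) 10).getD 0)]
    show PySem.Int.mod (PySem.List.pyGetD
        (105 :: (PySem.List.pyRange 0 (s.toList.length : Int) 2).map (pvPairSym s.toList)) 0 0 +
        ((PySem.List.enumerate
          (105 :: (PySem.List.pyRange 0 (s.toList.length : Int) 2).map (pvPairSym s.toList)) 0).map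
          (fun p => p.1 * p.2)).sum) 103 =
      PySem.Int.mod (pvAltPairs s.toList 0 105) 103
    rw [pvCheckExpr, pvAltPairs_eq (s.toList.length / 2) s.toList hm hdig 0 105]
    norm_num
  · rw [Bool.not_eq_true] at hcond
    simp only [hcond, Bool.false_eq_true, ite_false]
    rw [PySem.List.foldl_append_eq_flatMap pvMapping128]
    show PySem.Int.mod (PySem.List.pyGetD (104 :: s.toList.flatMap pvMapping128) 0 0 +
        ((PySem.List.enumerate (104 :: s.toList.flatMap pvMapping128) 0).map
          (fun p => p.1 * p.2)).sum) 103 =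
      PySem.Int.mod (pvAltChars s.toList 0 104) 103
    rw [pvCheckExpr, pvAltChars_eq s.toList 0 104]
    norm_num
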